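-- pv_equiv track=rewrite | github.com/cwaldbieser/aoc | 2023/puzzle_03_01.py | find_parts
-- ===== SOURCE A (Python) =====
-- def find_parts(questionable_parts, symbols):
--     """
--     Determine if any `questionable_parts` are actually parts.
--     """
--     parts = []
--     for part, pos_start, pos_end in questionable_parts:
--         for pos in range(pos_start - 1, pos_end + 1):
--             if pos in symbols:
--                 parts.append((part, pos_start, pos_end))
--                 break
--     return parts
-- ===== SOURCE B (Python) =====
-- def _bisect_left(s, x):
--     lo, hi = 0, len(s)
--     while lo < hi:
--         mid = (lo + hi) // 2
--         if s[mid] < x: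
--             lo = mid + 1
--         else:
--             hi = mid
--     return lo
--
--
-- def find_parts(questionable_parts, symbols):
--     """
--     Determine if any `questionable_parts` are actually parts.
--     """
--     syms = sorted(symbols)
--     parts = []
--     for part, pos_start, pos_end in questionable_parts:
--         i = _bisect_left(syms, pos_start - 1)
--         if i < len(syms) and syms[i] <= pos_end:
--             parts.append((part, pos_start, pos_end))
--     return parts
-- ===== Notes on version B (the rewrite author's own statement) =====
-- stated objective: alternative
-- what changed: Instead of scanning every position in [pos_start-1, pos_end] and testing list membership, B sorts the symbols once and answers each part with a hand-written binary search (bisect_left) for the first symbol >= pos_start-1, including the part iff that symbol is <= pos_end; asymptotically cheaper, but the interpreted search loop was not measured faster than A's C-level 'in' scan.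
import Mathlib
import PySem

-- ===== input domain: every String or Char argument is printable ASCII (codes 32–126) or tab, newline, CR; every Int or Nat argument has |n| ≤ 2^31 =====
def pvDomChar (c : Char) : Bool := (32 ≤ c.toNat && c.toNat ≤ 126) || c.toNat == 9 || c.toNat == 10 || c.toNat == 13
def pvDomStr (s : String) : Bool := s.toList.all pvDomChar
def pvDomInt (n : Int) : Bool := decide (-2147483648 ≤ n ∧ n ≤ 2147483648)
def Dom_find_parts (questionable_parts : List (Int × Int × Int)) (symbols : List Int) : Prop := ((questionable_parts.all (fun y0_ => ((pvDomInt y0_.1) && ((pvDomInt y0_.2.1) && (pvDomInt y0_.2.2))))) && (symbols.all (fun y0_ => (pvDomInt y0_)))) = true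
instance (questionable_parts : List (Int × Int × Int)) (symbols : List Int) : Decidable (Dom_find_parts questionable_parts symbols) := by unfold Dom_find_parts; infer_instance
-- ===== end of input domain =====

-- B sorts the symbols once and replaces A's per-position membership scan with a binary search over the sorted symbols (objective: alternative algorithm).


-- ===== PORT A =====
-- inner `for pos in range(...): if pos in symbols: append; break`, as a position counter
-- (kept lazy like Python's range: the positions are counted up, not materialized as a list)
def pvInnerA (pos b : Int) (symbols : List Int) : Bool :=
  if _h : pos < b then
    if symbols.contains pos then true else pvInnerA (pos + 1) b symbols
  else false
termination_by (b - pos).toNat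
decreasing_by omega

def find_parts (questionable_parts : List (Int × Int × Int)) (symbols : List Int) : List (Int × Int × Int) :=
  questionable_parts.foldl
    (fun parts t =>
      if pvInnerA (t.2.1 - 1) (t.2.2 + 1) symbols then parts ++ [t]
      else parts)
    []

-- ===== PORT B =====
-- Source B's hand-written _bisect_left while-loop, step for step (lo/hi are Nat indices, 0 ≤ lo ≤ hi ≤ len)
def pvBisectLeft (s : List Int) (x : Int) (lo hi : Nat) : Nat :=
  if _h : lo < hi then
    if s.getD ((lo + hi) / 2) 0 < x then pvBisectLeft s x ((lo + hi) / 2 + 1) hi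
    else pvBisectLeft s x lo ((lo + hi) / 2)
  else lo
termination_by hi - lo
decreasing_by all_goals omega

def find_parts_alt (questionable_parts : List (Int × Int × Int)) (symbols : List Int) : List (Int × Int × Int) :=
  let syms := PySem.List.sorted symbols (fun y => y)
  questionable_parts.foldl
    (fun parts t =>
      let i := pvBisectLeft syms (t.2.1 - 1) 0 syms.length
      if i < syms.length ∧ syms.getD i 0 ≤ t.2.2 then parts ++ [t]
      else parts)
    []

-- ===== PRECONDITION & SPEC =====
def Spec_find_parts (questionable_parts : List (Int × Int × Int)) (symbols : List Int) (out : List (Int × Int × Int)) : Prop := out = find_parts_alt questionable_parts symbols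
instance (questionable_parts : List (Int × Int × Int)) (symbols : List Int) (out : List (Int × Int × Int)) : Decidable (Spec_find_parts questionable_parts symbols out) := by unfold Spec_find_parts; infer_instance

-- ===== CLAIM (what is proved, stated in full; the proofs are below) =====
def Claim_equal_find_parts : Prop := ∀ (questionable_parts : List (Int × Int × Int)) (symbols : List Int), Dom_find_parts questionable_parts symbols → Spec_find_parts questionable_parts symbols (find_parts questionable_parts symbols)

-- ===== LEMMAS AND PROOFS =====

-- A's inner loop succeeds iff some symbol lies in [pos, b)
theorem pvInnerA_iff (pos b : Int) (symbols : List Int) :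
    pvInnerA pos b symbols = true ↔ ∃ y ∈ symbols, pos ≤ y ∧ y < b := by
  induction pos using pvInnerA.induct b symbols with
  | case1 pos hlt hc =>
      rw [pvInnerA]
      simp only [dif_pos hlt, if_pos hc, true_iff]
      exact ⟨pos, List.contains_iff_mem.mp hc, le_refl _, hlt⟩
  | case2 pos hlt hc ih =>
      rw [pvInnerA]
      simp only [dif_pos hlt, if_neg hc, ih]
      constructor
      · rintro ⟨y, hy, h1, h2⟩; exact ⟨y, hy, by omega, h2⟩
      · rintro ⟨y, hy, h1, h2⟩
        refine ⟨y, hy, ?_, h2⟩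
        rcases eq_or_lt_of_le h1 with rfl | h
        · exact absurd (List.contains_iff_mem.mpr hy) hc
        · omega
  | case3 pos hnlt =>
      rw [pvInnerA]
      simp only [dif_neg hnlt]
      constructor
      · intro h; exact absurd h (by simp)
      · rintro ⟨y, hy, h1, h2⟩; omega

-- sortedness phrased on getD
theorem getD_mono_of_pairwise (s : List Int) (hs : s.Pairwise (· ≤ ·))
    {j k : Nat} (hjk : j ≤ k) (hk : k < s.length) :
    s.getD j 0 ≤ s.getD k 0 := by
  rcases eq_or_lt_of_le hjk with rfl | h
  · exact le_refl _
  · rw [List.getD_eq_getElem s 0 (lt_trans h hk), List.getD_eq_getElem s 0 hk]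
    exact (List.pairwise_iff_getElem.mp hs) j k _ _ h

-- the binary-search loop invariant: result r keeps "everything below r is < x, everything from r on is ≥ x"
theorem pvBisectLeft_spec (s : List Int) (x : Int) (hs : s.Pairwise (· ≤ ·)) :
    ∀ (lo hi : Nat), lo ≤ hi → hi ≤ s.length →
      (∀ j, j < lo → s.getD j 0 < x) →
      (∀ j, hi ≤ j → j < s.length → x ≤ s.getD j 0) →
      lo ≤ pvBisectLeft s x lo hi ∧ pvBisectLeft s x lo hi ≤ hi ∧
      (∀ j, j < pvBisectLeft s x lo hi → s.getD j 0 < x) ∧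
      (∀ j, pvBisectLeft s x lo hi ≤ j → j < s.length → x ≤ s.getD j 0) := by
  intro lo hi
  induction lo, hi using pvBisectLeft.induct s x with
  | case1 lo hi hlt hmid ih =>
      intro hle hhi hbelow habove
      have hmlt : (lo + hi) / 2 < hi := by omega
      have hlo : lo ≤ (lo + hi) / 2 := by omega
      rw [pvBisectLeft]
      simp only [dif_pos hlt, if_pos hmid]
      have h' := ih (by omega) hhi
        (fun j hj => by
          rcases Nat.lt_or_ge j lo with hc | hc
          · exact hbelow j hc
          · exact lt_of_le_of_lt (getD_mono_of_pairwise s hs (by omega) (by omega)) hmid)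
        habove
      exact ⟨by omega, h'.2.1, h'.2.2.1, h'.2.2.2⟩
  | case2 lo hi hlt hmid ih =>
      intro hle hhi hbelow habove
      have hmlt : (lo + hi) / 2 < hi := by omega
      have hlo : lo ≤ (lo + hi) / 2 := by omega
      rw [pvBisectLeft]
      simp only [dif_pos hlt, if_neg hmid]
      have h' := ih hlo (by omega) hbelow
        (fun j hj hjl => le_trans (by omega : x ≤ s.getD ((lo + hi) / 2) 0)
          (getD_mono_of_pairwise s hs hj hjl))
      exact ⟨h'.1, by omega, h'.2.2.1, h'.2.2.2⟩
  | case3 lo hi hnlt =>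
      intro hle hhi hbelow habove
      have heq : lo = hi := by omega
      subst heq
      rw [pvBisectLeft]
      simp only [dif_neg hnlt]
      exact ⟨le_refl _, le_refl _, hbelow, habove⟩

-- B's per-part test ↔ some symbol lies in [a, b]
theorem condB_iff (symbols : List Int) (a b : Int) :
    (pvBisectLeft (PySem.List.sorted symbols (fun y => y)) a 0
        (PySem.List.sorted symbols (fun y => y)).length <
        (PySem.List.sorted symbols (fun y => y)).length ∧
      (PySem.List.sorted symbols (fun y => y)).getD
        (pvBisectLeft (PySem.List.sorted symbols (fun y => y)) a 0
          (PySem.List.sorted symbols (fun y => y)).length) 0 ≤ b)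
    ↔ ∃ y ∈ symbols, a ≤ y ∧ y ≤ b := by
  set s := PySem.List.sorted symbols (fun y => y) with hsdef
  have hs : s.Pairwise (· ≤ ·) := PySem.List.sorted_pairwise symbols (fun y => y)
  set r := pvBisectLeft s a 0 s.length with hrdef
  obtain ⟨-, hr_le, hbelow, habove⟩ :=
    pvBisectLeft_spec s a hs 0 s.length (Nat.zero_le _) (le_refl _)
      (fun j hj => absurd hj (Nat.not_lt_zero j))
      (fun j hj hjl => absurd hjl (by omega))
  constructor
  · rintro ⟨hrlen, hrb⟩
    refine ⟨s.getD r 0, ?_, habove r (le_refl _) hrlen, hrb⟩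
    rw [← PySem.List.mem_sorted symbols (fun y => y) false (s.getD r 0), ← hsdef,
      List.getD_eq_getElem s 0 hrlen]
    exact List.getElem_mem hrlen
  · rintro ⟨y, hy, hay, hyb⟩
    have hy' : y ∈ s := (PySem.List.mem_sorted symbols (fun y => y) false y).mpr hy
    obtain ⟨j, hj, hyj⟩ := List.getElem_of_mem hy'
    have hgj : s.getD j 0 = y := by rw [List.getD_eq_getElem s 0 hj, hyj]
    have hrj : r ≤ j := by
      by_contra hc
      have := hbelow j (by omega)
      omega
    exact ⟨by omega, le_trans (getD_mono_of_pairwise s hs hrj hj) (by omega)⟩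

theorem find_parts_spec : Claim_equal_find_parts := by
  intro qs symbols hd
  clear hd
  unfold Spec_find_parts find_parts find_parts_alt
  induction qs using List.reverseRecOn with
  | nil => rfl
  | append_singleton l t ih =>
      rw [List.foldl_append, List.foldl_append, ih]
      simp only [List.foldl_cons, List.foldl_nil]
      have hA : pvInnerA (t.2.1 - 1) (t.2.2 + 1) symbols = true ↔
          ∃ y ∈ symbols, t.2.1 - 1 ≤ y ∧ y ≤ t.2.2 := by
        rw [pvInnerA_iff]
        constructor
        · rintro ⟨y, hy, h1, h2⟩; exact ⟨y, hy, h1, by omega⟩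
        · rintro ⟨y, hy, h1, h2⟩; exact ⟨y, hy, h1, by omega⟩
      by_cases h : ∃ y ∈ symbols, t.2.1 - 1 ≤ y ∧ y ≤ t.2.2
      · rw [if_pos (hA.mpr h), if_pos ((condB_iff symbols (t.2.1 - 1) t.2.2).mpr h)]
      · rw [if_neg (fun hc => h (hA.mp hc)),
          if_neg (fun hc => h ((condB_iff symbols (t.2.1 - 1) t.2.2).mp hc))]
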